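-- pv_equiv track=rewrite | github.com/HybridTalentComputing/i18n-translation-skill | skills/i18n-translation/scripts/split-i18n.py | split_by_feature
-- ===== SOURCE A (Python) =====
-- from typing import Dict
--
-- def split_by_prefix(data: Dict, prefix: str) -> Dict:
--     """Extract keys that start with given prefix."""
--     result = {}
--     prefix_len = len(prefix)
--
--     for key, value in data.items():
--         if key.startswith(prefix):
--             new_key = key[prefix_len:]  # Remove prefix
--             result[new_key] = value
--
--     return result
--
-- def split_by_feature(data: Dict, features: list) -> Dict[str, Dict]:
--     """Split data by feature prefixes."""
--     result = {}
--     remaining = {}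
--
--     for feature in features:
--         feature_data = split_by_prefix(data, f"{feature}.")
--         if feature_data:
--             result[feature] = feature_data
--
--     # Add remaining keys without prefix
--     for key, value in data.items():
--         if not any(key.startswith(f"{f}.") for f in features):
--             remaining[key] = value
--
--     if remaining:
--         result['common'] = remaining
--
--     return result
-- ===== SOURCE B (Python) =====
-- def split_by_feature(data, features):
--     """Split data by feature prefixes: single pass over data.items() filling per-feature buckets and a common dict."""
--     buckets = {}
--     common = {}
--     for key, value in data.items():
--         matched = False
--         for feature in features:
--             prefix = f"{feature}."
--             if key.startswith(prefix):
--                 bucket = buckets.setdefault(feature, {})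
--                 bucket[key[len(prefix):]] = value
--                 matched = True
--         if not matched:
--             common[key] = value
--     result = {}
--     for feature in features:
--         bucket = buckets.get(feature)
--         if bucket:
--             result[feature] = bucket
--     if common:
--         result['common'] = common
--     return result
-- ===== Notes on version B (the rewrite author's own statement) =====
-- stated objective: faster
-- what changed: A scans the whole dict once per feature (split_by_prefix) and then rescans it with any() for common keys; B makes a single pass over data.items(), routing each key into per-feature buckets and a common dict in one traversal, then assembles the result in features order.
import Mathlib
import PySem

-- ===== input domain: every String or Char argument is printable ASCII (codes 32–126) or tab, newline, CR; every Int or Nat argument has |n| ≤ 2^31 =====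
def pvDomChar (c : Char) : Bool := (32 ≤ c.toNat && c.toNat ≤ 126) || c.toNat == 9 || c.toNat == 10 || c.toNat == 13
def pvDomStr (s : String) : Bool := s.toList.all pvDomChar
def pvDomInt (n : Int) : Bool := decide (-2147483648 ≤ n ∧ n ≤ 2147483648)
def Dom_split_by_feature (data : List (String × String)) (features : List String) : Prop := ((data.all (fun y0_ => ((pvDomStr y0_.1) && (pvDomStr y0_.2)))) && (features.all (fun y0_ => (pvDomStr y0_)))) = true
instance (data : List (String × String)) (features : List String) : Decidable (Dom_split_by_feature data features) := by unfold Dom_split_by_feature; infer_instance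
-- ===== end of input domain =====

-- B replaces A's per-feature rescans of data by one pass over data.items() filling per-feature buckets and the common dict together (alternative decomposition, same result).


-- ===== PORT A =====
-- helper: split_by_prefix — scans the whole dict for keys starting with prefix
def pvA_split_by_prefix (data : List (String × String)) (pfx : String) : PySem.Dict String String :=
  data.foldl (fun r kv =>
    if PySem.Str.startswith kv.1 pfx then
      r.insert (PySem.Str.slice kv.1 (some ((PySem.Str.len pfx : Int))) none) kv.2
    else r) PySem.Dict.empty

def split_by_feature (data : List (String × String)) (features : List String) : List (String × List (String × String)) :=
  let result : PySem.Dict String (List (String × String)) :=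
    features.foldl (fun res f =>
      let fd := pvA_split_by_prefix data (f ++ ".")
      if fd.items ≠ [] then res.insert f fd.items else res) PySem.Dict.empty
  let remaining : PySem.Dict String String :=
    data.foldl (fun rem kv =>
      if !(features.any (fun f => PySem.Str.startswith kv.1 (f ++ "."))) then
        rem.insert kv.1 kv.2
      else rem) PySem.Dict.empty
  (if remaining.items ≠ [] then result.insert "common" remaining.items else result).items

-- ===== PORT B =====
-- helper: the inner loop over features for one (key, value) item: updates buckets, tracks matched
def pvB_inner (kv : String × String) (features : List String)
    (st : PySem.Dict String (PySem.Dict String String) × Bool) :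
    PySem.Dict String (PySem.Dict String String) × Bool :=
  features.foldl (fun acc f =>
    if PySem.Str.startswith kv.1 (f ++ ".") then
      (acc.1.insert f ((acc.1.getD f PySem.Dict.empty).insert
          (PySem.Str.slice kv.1 (some ((PySem.Str.len (f ++ ".") : Int))) none) kv.2), true)
    else acc) st

-- helper: one step of the single pass over data
def pvB_step (features : List String)
    (st : PySem.Dict String (PySem.Dict String String) × PySem.Dict String String)
    (kv : String × String) :
    PySem.Dict String (PySem.Dict String String) × PySem.Dict String String :=
  let r := pvB_inner kv features (st.1, false)
  if r.2 then (r.1, st.2) else (r.1, st.2.insert kv.1 kv.2)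

def split_by_feature_alt (data : List (String × String)) (features : List String) : List (String × List (String × String)) :=
  let bc := data.foldl (pvB_step features) (PySem.Dict.empty, PySem.Dict.empty)
  let result : PySem.Dict String (List (String × String)) :=
    features.foldl (fun res f =>
      let b := bc.1.getD f PySem.Dict.empty
      if b.items ≠ [] then res.insert f b.items else res) PySem.Dict.empty
  (if bc.2.items ≠ [] then result.insert "common" bc.2.items else result).items

-- ===== PRECONDITION & SPEC =====
def Spec_split_by_feature (data : List (String × String)) (features : List String) (out : List (String × List (String × String))) : Prop := out = split_by_feature_alt data features
instance (data : List (String × String)) (features : List String) (out : List (String × List (String × String))) : Decidable (Spec_split_by_feature data features out) := by unfold Spec_split_by_feature; infer_instance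

-- ===== CLAIM (what is proved, stated in full; the proofs are below) =====
def Claim_equal_split_by_feature : Prop := ∀ (data : List (String × String)) (features : List String), Dom_split_by_feature data features → Spec_split_by_feature data features (split_by_feature data features)

-- ===== LEMMAS AND PROOFS =====

-- matched flag of the inner loop = any(key.startswith(f + '.') for f in features)
theorem pvB_inner_snd (kv : String × String) (features : List String)
    (st : PySem.Dict String (PySem.Dict String String) × Bool) :
    (pvB_inner kv features st).2 = (st.2 || features.any (fun f => PySem.Str.startswith kv.1 (f ++ "."))) := by
  induction features generalizing st with
  | nil => simp [pvB_inner]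
  | cons f fs ih =>
    simp only [pvB_inner, List.foldl_cons, List.any_cons]
    by_cases h : PySem.Str.startswith kv.1 (f ++ ".") = true
    · rw [if_pos h, show (fs.foldl _ _ : _ × Bool) = pvB_inner kv fs _ from rfl, ih]
      rw [h]
      simp
    · rw [if_neg h, show (fs.foldl _ _ : _ × Bool) = pvB_inner kv fs st from rfl, ih]
      rw [Bool.eq_false_iff.mpr h]
      simp

-- bucket content after the inner loop, read at any key g
theorem pvB_inner_getD (kv : String × String) (features : List String)
    (st : PySem.Dict String (PySem.Dict String String) × Bool) (g : String) :
    (pvB_inner kv features st).1.getD g PySem.Dict.empty =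
      (if g ∈ features ∧ PySem.Str.startswith kv.1 (g ++ ".") = true then
        (st.1.getD g PySem.Dict.empty).insert
          (PySem.Str.slice kv.1 (some ((PySem.Str.len (g ++ ".") : Int))) none) kv.2
      else st.1.getD g PySem.Dict.empty) := by
  induction features generalizing st with
  | nil => simp [pvB_inner]
  | cons f fs ih =>
    simp only [pvB_inner, List.foldl_cons]
    by_cases h : PySem.Str.startswith kv.1 (f ++ ".") = true
    · rw [if_pos h, show (fs.foldl _ _ : _ × Bool) = pvB_inner kv fs _ from rfl, ih]
      by_cases hg : g = f
      · subst hg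
        rw [PySem.Dict.getD_insert_self]
        by_cases hm : g ∈ fs
        · rw [if_pos ⟨hm, h⟩, if_pos ⟨List.mem_cons_self, h⟩,
              PySem.Dict.insert_insert_self]
        · rw [if_neg (fun hc => hm hc.1), if_pos ⟨List.mem_cons_self, h⟩]
      · rw [PySem.Dict.getD_insert_of_ne _ _ _ hg]
        by_cases hc : g ∈ fs ∧ PySem.Str.startswith kv.1 (g ++ ".") = true
        · rw [if_pos hc, if_pos ⟨List.mem_cons_of_mem f hc.1, hc.2⟩]
        · rw [if_neg hc, if_neg (fun hc' => hc ⟨(List.mem_cons.mp hc'.1).resolve_left hg, hc'.2⟩)]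
    · rw [if_neg h, show (fs.foldl _ _ : _ × Bool) = pvB_inner kv fs st from rfl, ih]
      by_cases hc : g ∈ fs ∧ PySem.Str.startswith kv.1 (g ++ ".") = true
      · rw [if_pos hc, if_pos ⟨List.mem_cons_of_mem f hc.1, hc.2⟩]
      · have hg : g = f → PySem.Str.startswith kv.1 (g ++ ".") ≠ true := by
          intro he; subst he; exact fun hs => h hs
        rw [if_neg hc, if_neg (fun hc' => ((List.mem_cons.mp hc'.1).elim
              (fun he => hg he hc'.2) (fun hm => hc ⟨hm, hc'.2⟩)))]

-- the first component of one step of B's pass is the inner fold's buckets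
theorem pvB_step_fst (features : List String)
    (st : PySem.Dict String (PySem.Dict String String) × PySem.Dict String String)
    (kv : String × String) :
    (pvB_step features st kv).1 = (pvB_inner kv features (st.1, false)).1 := by
  simp only [pvB_step]
  by_cases h : (pvB_inner kv features (st.1, false)).2 = true
  · rw [if_pos h]
  · rw [if_neg h]

-- the common component of B's single pass equals A's remaining loop
theorem pvB_common (data : List (String × String)) (features : List String)
    (st : PySem.Dict String (PySem.Dict String String) × PySem.Dict String String) :
    (data.foldl (pvB_step features) st).2 =
      data.foldl (fun rem kv =>
        if !(features.any (fun f => PySem.Str.startswith kv.1 (f ++ "."))) then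
          rem.insert kv.1 kv.2
        else rem) st.2 := by
  induction data generalizing st with
  | nil => rfl
  | cons kv rest ih =>
    simp only [List.foldl_cons]
    rw [ih]
    have h2 : (pvB_step features st kv).2 =
        if !(features.any (fun f => PySem.Str.startswith kv.1 (f ++ "."))) then
          st.2.insert kv.1 kv.2
        else st.2 := by
      simp only [pvB_step]
      rw [pvB_inner_snd]
      by_cases h : features.any (fun f => PySem.Str.startswith kv.1 (f ++ ".")) = true
      · rw [h]; simp
      · rw [Bool.eq_false_iff.mpr h]; simp
    rw [h2]

-- the bucket of a feature g after B's single pass equals A's split_by_prefix fold, started from st's bucket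
theorem pvB_bucket (data : List (String × String)) (features : List String) (g : String)
    (hg : g ∈ features)
    (st : PySem.Dict String (PySem.Dict String String) × PySem.Dict String String) :
    (data.foldl (pvB_step features) st).1.getD g PySem.Dict.empty =
      data.foldl (fun r kv =>
        if PySem.Str.startswith kv.1 (g ++ ".") then
          r.insert (PySem.Str.slice kv.1 (some ((PySem.Str.len (g ++ ".") : Int))) none) kv.2
        else r) (st.1.getD g PySem.Dict.empty) := by
  induction data generalizing st with
  | nil => rfl
  | cons kv rest ih =>
    simp only [List.foldl_cons]
    rw [ih]
    have h1 : (pvB_step features st kv).1.getD g PySem.Dict.empty =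
        if PySem.Str.startswith kv.1 (g ++ ".") then
          (st.1.getD g PySem.Dict.empty).insert
            (PySem.Str.slice kv.1 (some ((PySem.Str.len (g ++ ".") : Int))) none) kv.2
        else st.1.getD g PySem.Dict.empty := by
      rw [pvB_step_fst, pvB_inner_getD]
      by_cases h : PySem.Str.startswith kv.1 (g ++ ".") = true
      · rw [if_pos ⟨hg, h⟩, if_pos h]
      · rw [if_neg (fun hc => h hc.2), if_neg h]
    rw [h1]

-- ===== VERDICT (by name: the statement is the Claim_ definition above) =====
theorem split_by_feature_spec : Claim_equal_split_by_feature := by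
  intro data features _
  unfold Spec_split_by_feature split_by_feature split_by_feature_alt
  have hres :
      (features.foldl (fun res f =>
        let fd := pvA_split_by_prefix data (f ++ ".")
        if fd.items ≠ [] then res.insert f fd.items else res)
        (PySem.Dict.empty : PySem.Dict String (List (String × String)))) =
      (features.foldl (fun res f =>
        let b := (data.foldl (pvB_step features) (PySem.Dict.empty, PySem.Dict.empty)).1.getD f PySem.Dict.empty
        if b.items ≠ [] then res.insert f b.items else res)
        (PySem.Dict.empty : PySem.Dict String (List (String × String)))) := by
    apply PySem.List.foldl_congr_mem
    intro acc f hf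
    have hb := pvB_bucket data features f hf (PySem.Dict.empty, PySem.Dict.empty)
    simp only [hb, PySem.Dict.getD_empty]
    rfl
  have hcom := pvB_common data features (PySem.Dict.empty, PySem.Dict.empty)
  simp only [hres, hcom]
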